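-- pv_equiv track=rewrite | github.com/lebenswurzel/solawi-bedarf | dev/apply_license_headers.py | remove_banner
-- ===== SOURCE A (Python) =====
-- def remove_banner(content, comment_open, comment_close) -> tuple[str, str]:
--   lines = []
--   banner_lines = []
--   opening_comment_found = False
--   closing_comment_found = False
--   for line in content.split('\n'):
--     if line == comment_open:
--       opening_comment_found = True
--     if not closing_comment_found and opening_comment_found:
--       if line == comment_close:
--         closing_comment_found = True
--       else:
--         banner_lines.append(line)
--       continue
--     lines.append(line)
--   return '\n'.join(lines), '\n'.join(banner_lines[1:])
-- ===== SOURCE B (Python) =====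
-- def remove_banner(content, comment_open, comment_close) -> tuple[str, str]:
--     lines = content.split('\n')
--     try:
--         i = lines.index(comment_open)
--     except ValueError:
--         return '\n'.join(lines), ''
--     try:
--         j = lines.index(comment_close, i)
--     except ValueError:
--         return '\n'.join(lines[:i]), '\n'.join(lines[i + 1:])
--     return '\n'.join(lines[:i] + lines[j + 1:]), '\n'.join(lines[i + 1:j])
-- ===== Notes on version B (the rewrite author's own statement) =====
-- stated objective: simpler
-- what changed: Replaces A's per-line flag-driven accumulator loop with two list.index boundary lookups plus slicing: remaining = lines[:i] + lines[j+1:], banner = lines[i+1:j].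
import Mathlib
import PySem

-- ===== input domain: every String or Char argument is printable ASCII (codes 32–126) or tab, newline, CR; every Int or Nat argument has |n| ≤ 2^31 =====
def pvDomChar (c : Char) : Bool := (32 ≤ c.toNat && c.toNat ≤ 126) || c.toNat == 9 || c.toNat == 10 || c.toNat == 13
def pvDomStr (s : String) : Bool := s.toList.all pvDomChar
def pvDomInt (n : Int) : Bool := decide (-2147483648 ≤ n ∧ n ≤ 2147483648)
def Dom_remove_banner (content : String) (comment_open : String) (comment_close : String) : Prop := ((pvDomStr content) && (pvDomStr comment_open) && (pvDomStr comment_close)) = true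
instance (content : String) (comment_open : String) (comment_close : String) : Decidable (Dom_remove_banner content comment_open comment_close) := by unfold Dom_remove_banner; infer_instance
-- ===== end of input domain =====

-- B replaces A's flag-driven per-line loop by two index lookups plus slicing (objective: simpler).

-- ===== PORT A =====
-- loop body of A: state = (lines, banner_lines, opening_comment_found, closing_comment_found)
def rbStep (comment_open : String) (comment_close : String)
    (st : List String × List String × Bool × Bool) (line : String) :
    List String × List String × Bool × Bool :=
  let lines := st.1
  let banner := st.2.1
  let opening := st.2.2.1 || (line == comment_open)   -- 'if line == comment_open: opening = True'
  let closing := st.2.2.2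
  if !closing && opening then
    if line == comment_close then (lines, banner, opening, true)
    else (lines, banner ++ [line], opening, closing)
  else (lines ++ [line], banner, opening, closing)

def remove_banner (content : String) (comment_open : String) (comment_close : String) : String × String :=
  -- content.split('\n'): sep "\n" ≠ "" so split? is always some here
  let pieces := (PySem.Str.split? content "\n").getD []
  let r := pieces.foldl (rbStep comment_open comment_close) ([], [], false, false)
  (PySem.Str.join "\n" r.1, PySem.Str.join "\n" (r.2.1.drop 1))   -- banner_lines[1:]

-- ===== PORT B =====
def remove_banner_alt (content : String) (comment_open : String) (comment_close : String) : String × String :=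
  let lines := (PySem.Str.split? content "\n").getD []
  match PySem.List.index? lines comment_open with
  | none => (PySem.Str.join "\n" lines, "")
  | some i =>
    -- lines.index(comment_close, i): search from position i, so j = i + k
    match PySem.List.index? (lines.drop i) comment_close with
    | none => (PySem.Str.join "\n" (lines.take i), PySem.Str.join "\n" (lines.drop (i + 1)))
    | some k =>
      let j := i + k
      (PySem.Str.join "\n" (lines.take i ++ lines.drop (j + 1)),
       PySem.Str.join "\n" ((lines.drop (i + 1)).take (j - (i + 1))))

-- ===== PRECONDITION & SPEC =====
def Spec_remove_banner (content : String) (comment_open : String) (comment_close : String) (out : String × String) : Prop := out = remove_banner_alt content comment_open comment_close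
instance (content : String) (comment_open : String) (comment_close : String) (out : String × String) : Decidable (Spec_remove_banner content comment_open comment_close out) := by unfold Spec_remove_banner; infer_instance

-- ===== CLAIM (what is proved, stated in full; the proofs are below) =====
def Claim_equal_remove_banner : Prop := ∀ (content : String) (comment_open : String) (comment_close : String), Dom_remove_banner content comment_open comment_close → Spec_remove_banner content comment_open comment_close (remove_banner content comment_open comment_close)

-- ===== LEMMAS AND PROOFS =====

-- phase 3 of A's loop: nothing found yet; lines not equal to comment_open pass through
theorem rbFold_open (co cc : String) (ls : List String) (l b : List String)
    (h : co ∉ ls) :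
    ls.foldl (rbStep co cc) (l, b, false, false) = (l ++ ls, b, false, false) := by
  induction ls generalizing l with
  | nil => simp
  | cons x xs ih =>
    have hx : (x == co) = false := by
      simp only [beq_eq_false_iff_ne]
      rintro rfl; exact h (List.mem_cons_self ..)
    simp only [List.foldl_cons, rbStep, hx]
    simp
    rw [ih _ (fun hm => h (List.mem_cons_of_mem _ hm))]
    simp

-- phase 2 of A's loop: open found, close not yet; lines go to the banner
theorem rbFold_banner (co cc : String) (ls : List String) (l b : List String)
    (h : cc ∉ ls) :
    ls.foldl (rbStep co cc) (l, b, true, false) = (l, b ++ ls, true, false) := by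
  induction ls generalizing b with
  | nil => simp
  | cons x xs ih =>
    have hx : (x == cc) = false := by
      simp only [beq_eq_false_iff_ne]
      rintro rfl; exact h (List.mem_cons_self ..)
    simp only [List.foldl_cons, rbStep, hx]
    simp
    rw [ih _ (fun hm => h (List.mem_cons_of_mem _ hm))]
    simp

-- phase 1 of A's loop: close found; every remaining line goes to lines
theorem rbFold_closed (co cc : String) (ls : List String) (l b : List String) (op : Bool) :
    ls.foldl (rbStep co cc) (l, b, op, true) =
      (l ++ ls, b, op || ls.any (· == co), true) := by
  induction ls generalizing l op with
  | nil => simp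
  | cons x xs ih =>
    simp only [List.foldl_cons, rbStep]
    simp
    rw [ih]
    simp [Bool.or_assoc]

theorem remove_banner_eq (content co cc : String) :
    remove_banner content co cc = remove_banner_alt content co cc := by
  unfold remove_banner remove_banner_alt
  set lines := (PySem.Str.split? content "\n").getD [] with hl
  clear_value lines
  rcases hidx : PySem.List.index? lines co with _ | i
  · -- comment_open not present
    have hno : co ∉ lines := (PySem.List.index?_eq_none_iff lines co).mp hidx
    simp only [hidx]
    rw [rbFold_open co cc lines [] [] hno]
    simp [PySem.Str.join]
  · obtain ⟨pre, suf, hsplit, hlen, hpre⟩ := (PySem.List.index?_eq_some_iff lines co i).mp hidx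
    subst hsplit
    have hdropi : (pre ++ co :: suf).drop i = co :: suf := by
      rw [← hlen]; exact List.drop_left
    have htakei : (pre ++ co :: suf).take i = pre := by
      rw [← hlen]; exact List.take_left
    have hdropi1 : (pre ++ co :: suf).drop (i + 1) = suf := by
      rw [show pre ++ co :: suf = (pre ++ [co]) ++ suf by simp,
        show i + 1 = (pre ++ [co]).length by simp [hlen]]
      exact List.drop_left
    simp only [hidx, hdropi]
    rw [List.foldl_append, rbFold_open co cc pre [] [] hpre]
    simp only [List.foldl_cons, rbStep]
    by_cases hcc : co = cc
    · -- equal delimiters: the open line closes immediately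
      subst hcc
      simp only [beq_self_eq_true, PySem.List.index?_cons_self]
      simp only [Bool.or_true, Bool.not_false, Bool.true_and, if_true]
      rw [rbFold_closed]
      simp [htakei, hdropi1]
    · have hcc' : (co == cc) = false := by simpa using hcc
      simp only [hcc', beq_self_eq_true, Bool.or_true, Bool.not_false, Bool.true_and,
        Bool.false_eq_true, if_true, ite_false, List.nil_append]
      rw [PySem.List.index?_cons_of_ne suf (Ne.symm (by exact fun h => hcc h.symm))]
      rcases hidx2 : PySem.List.index? suf cc with _ | k
      · -- no closing delimiter after the open line
        have hno2 : cc ∉ suf := (PySem.List.index?_eq_none_iff suf cc).mp hidx2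
        rw [rbFold_banner co cc suf pre [co] hno2]
        simp [htakei, hdropi1]
      · obtain ⟨p2, post, hs2, hl2, hp2⟩ := (PySem.List.index?_eq_some_iff suf cc k).mp hidx2
        subst hs2
        rw [List.foldl_append, rbFold_banner co cc p2 pre [co] hp2]
        simp only [List.foldl_cons, rbStep, beq_self_eq_true, Bool.true_or,
          Bool.not_false, Bool.true_and, if_true]
        rw [rbFold_closed]
        simp only [Option.map_some]
        have hdropj : (pre ++ co :: (p2 ++ cc :: post)).drop (i + (k + 1) + 1) = post := by
          have : pre ++ co :: (p2 ++ cc :: post) = (pre ++ co :: p2 ++ [cc]) ++ post := by simp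
          rw [this, show i + (k + 1) + 1 = (pre ++ co :: p2 ++ [cc]).length by simp [← hlen, ← hl2]; omega]
          exact List.drop_left
        have htkban : ((pre ++ co :: (p2 ++ cc :: post)).drop (i + 1)).take (i + (k + 1) - (i + 1)) = p2 := by
          have h1 : (pre ++ co :: (p2 ++ cc :: post)).drop (i + 1) = p2 ++ cc :: post := by
            rw [show pre ++ co :: (p2 ++ cc :: post) = (pre ++ [co]) ++ (p2 ++ cc :: post) by simp,
              show i + 1 = (pre ++ [co]).length by simp [hlen]]
            exact List.drop_left
          rw [h1]
          have h2 : i + (k + 1) - (i + 1) = k := by omega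
          rw [h2, ← hl2]; exact List.take_left
        simp [htakei, hdropj, htkban]

-- ===== VERDICT (by name: the statement is the Claim_ definition above) =====
theorem remove_banner_spec : Claim_equal_remove_banner := by
  intro content co cc _
  exact remove_banner_eq content co cc
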